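-- pv_equiv track=rewrite | github.com/Manutsawin/ExDataStructure | 3/63010779_Lab03_03.py | CheckVal
-- ===== SOURCE A (Python) =====
-- def CheckVal(v1,v2):
--     val1,val2=0,0
--     lst=["+","-","*","/","^"]
--     for i in range(len(lst)):
--         if  v1==lst[i]:
--             if i==1 or i==3 :val1=i-1
--             else:val1=i
--         if  v2==lst[i]:
--             if i==1 or i==3 :val2=i-1
--             else:val2=i
--     return bool(val1>=val2)
-- ===== SOURCE B (Python) =====
-- def CheckVal(v1, v2):
--     # Decide directly by comparing precedence tiers, no numeric values:
--     # result is False only when v2's tier strictly exceeds v1's.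
--     if v2 == "^":
--         return v1 == "^"
--     if v2 == "*" or v2 == "/":
--         return v1 == "*" or v1 == "/" or v1 == "^"
--     return True
-- ===== Notes on version B (the rewrite author's own statement) =====
-- stated objective: simpler
-- what changed: Replaces A's loop computing numeric precedence values for both arguments with a direct branch-on-v2 decision chain that uses no precedence numbers at all: it returns False exactly when v2's tier strictly dominates v1's.
import Mathlib
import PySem

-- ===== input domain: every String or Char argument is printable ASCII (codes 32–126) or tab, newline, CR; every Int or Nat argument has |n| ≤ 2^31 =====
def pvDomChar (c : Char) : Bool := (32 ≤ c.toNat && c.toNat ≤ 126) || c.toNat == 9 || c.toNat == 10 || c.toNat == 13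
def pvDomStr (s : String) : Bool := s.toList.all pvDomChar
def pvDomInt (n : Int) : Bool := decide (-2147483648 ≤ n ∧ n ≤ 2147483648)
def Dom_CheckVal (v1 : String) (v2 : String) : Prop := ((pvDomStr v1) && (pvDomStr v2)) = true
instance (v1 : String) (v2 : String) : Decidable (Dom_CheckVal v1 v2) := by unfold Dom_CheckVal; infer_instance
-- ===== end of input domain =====

-- B replaces A's numeric-precedence loop by a direct branch-on-v2 decision chain with no
-- precedence numbers at all (objective: simpler).
-- ===== PORT A =====
def pvLst_CheckVal : List String := ["+", "-", "*", "/", "^"]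

def CheckVal (v1 : String) (v2 : String) : Bool :=
  -- for i in range(len(lst)): update val1/val2 as A does
  let st := (PySem.List.pyRange 0 5 1).foldl (fun (s : Int × Int) i =>
    let li := (PySem.List.pyGet? pvLst_CheckVal i).getD ""   -- lst[i]; always in range here
    let a := if v1 = li then (if i = 1 ∨ i = 3 then i - 1 else i) else s.1
    let b := if v2 = li then (if i = 1 ∨ i = 3 then i - 1 else i) else s.2
    (a, b)) (0, 0)
  decide (st.1 ≥ st.2)

-- ===== PORT B =====
def CheckVal_alt (v1 : String) (v2 : String) : Bool :=
  if v2 = "^" then v1 = "^"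
  else if v2 = "*" ∨ v2 = "/" then v1 = "*" ∨ v1 = "/" ∨ v1 = "^"
  else true

-- ===== PRECONDITION & SPEC =====
def Spec_CheckVal (v1 : String) (v2 : String) (out : Bool) : Prop := out = CheckVal_alt v1 v2
instance (v1 : String) (v2 : String) (out : Bool) : Decidable (Spec_CheckVal v1 v2 out) := by unfold Spec_CheckVal; infer_instance

-- ===== CLAIM (what is proved, stated in full; the proofs are below) =====
def Claim_equal_CheckVal : Prop := ∀ (v1 : String) (v2 : String), Dom_CheckVal v1 v2 → Spec_CheckVal v1 v2 (CheckVal v1 v2)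

-- ===== LEMMAS AND PROOFS =====

-- the final value A's loop assigns to val1/val2, as a direct case split
def pvVal_CheckVal (v : String) : Int :=
  if v = "+" then 0 else if v = "-" then 0 else if v = "*" then 2
  else if v = "/" then 2 else if v = "^" then 4 else 0

-- the paired fold splits into its two independent components
theorem pvFold_pair (xs : List Int) (F G : Int → Int → Int) (a b : Int) :
    xs.foldl (fun (s : Int × Int) i => (F s.1 i, G s.2 i)) (a, b)
      = (xs.foldl F a, xs.foldl G b) := by
  induction xs generalizing a b with
  | nil => rfl
  | cons x xs ih => simp [List.foldl, ih]

theorem pvFold_one (v : String) :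
    ([0, 1, 2, 3, 4] : List Int).foldl (fun (s : Int) i =>
      if v = (PySem.List.pyGet? pvLst_CheckVal i).getD ""
      then (if i = 1 ∨ i = 3 then i - 1 else i) else s) 0 = pvVal_CheckVal v := by
  by_cases h1 : v = "+"
  · subst h1; decide
  by_cases h2 : v = "-"
  · subst h2; decide
  by_cases h3 : v = "*"
  · subst h3; decide
  by_cases h4 : v = "/"
  · subst h4; decide
  by_cases h5 : v = "^"
  · subst h5; decide
  simp [pvVal_CheckVal, pvLst_CheckVal, PySem.List.pyGet?, PySem.List.pyIdx?,
    h1, h2, h3, h4, h5, List.foldl]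

theorem pvFold_eq (v1 v2 : String) :
    ((PySem.List.pyRange 0 5 1).foldl (fun (s : Int × Int) i =>
      let li := (PySem.List.pyGet? pvLst_CheckVal i).getD ""
      let a := if v1 = li then (if i = 1 ∨ i = 3 then i - 1 else i) else s.1
      let b := if v2 = li then (if i = 1 ∨ i = 3 then i - 1 else i) else s.2
      (a, b)) (0, 0)) = (pvVal_CheckVal v1, pvVal_CheckVal v2) := by
  have h : PySem.List.pyRange 0 5 1 = [0, 1, 2, 3, 4] := by decide
  rw [h]
  exact (pvFold_pair [0, 1, 2, 3, 4]
      (fun a i => if v1 = (PySem.List.pyGet? pvLst_CheckVal i).getD ""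
        then (if i = 1 ∨ i = 3 then i - 1 else i) else a)
      (fun b i => if v2 = (PySem.List.pyGet? pvLst_CheckVal i).getD ""
        then (if i = 1 ∨ i = 3 then i - 1 else i) else b) 0 0).trans
    (by rw [pvFold_one v1, pvFold_one v2])

-- comparing A's numeric values agrees with B's tier decision chain
theorem pvCompare_eq (v1 v2 : String) :
    decide (pvVal_CheckVal v1 ≥ pvVal_CheckVal v2) = CheckVal_alt v1 v2 := by
  unfold CheckVal_alt pvVal_CheckVal
  by_cases h1 : v1 = "+" <;> by_cases h2 : v1 = "-" <;> by_cases h3 : v1 = "*" <;>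
    by_cases h4 : v1 = "/" <;> by_cases h5 : v1 = "^" <;>
  by_cases g1 : v2 = "+" <;> by_cases g2 : v2 = "-" <;> by_cases g3 : v2 = "*" <;>
    by_cases g4 : v2 = "/" <;> by_cases g5 : v2 = "^" <;>
  simp_all

-- ===== VERDICT =====
theorem CheckVal_spec : Claim_equal_CheckVal := by
  intro v1 v2 _
  unfold Spec_CheckVal CheckVal
  rw [pvFold_eq]
  exact pvCompare_eq v1 v2
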